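/- GENERATED by tools/from_farm_form.py from prooffarm-gif/accepted/DGifGetScreenDesc.3/Proof.lean (a worked proof of the farm's unit `DGifGetScreenDesc.3`,
   accepted by the verdict) — do not edit. -/
import Gif.Spec.Units.DGifGetScreenDesc_3
import Gif.Spec.AllSegs
import Gif.Spec.Proved.DGifGetScreenDesc_3_Lemmas

open X86 X86.User Asan ProgX.Base ProgX.Base.Spec Gif.Spec

/-!
  `DGifGetScreenDesc.3` (0x108152 … 0x1081cc, 29 instructions; dgif_lib.c:272-277, 301, 309): A BODY SEGMENT OF A PROTECTED FUNCTION
  WITHOUT A CONTRACT CALL: three checked stores of the flag bytes into scalar fields of gif, `BitsPerPixel` in `r12`, then either on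
  to GifMakeMapObject (0x108211, `AtMake`) or the checked store `SColorMap = NULL` and the jump to the epilogue (0x1080f7, `Exit`).
  The walk (one `u_walk`, both arms of the `js`) and the carry lemmas are in Lemmas.lean (`sd3_seg`).
-/

/-- Segment 3 of `DGifGetScreenDesc` takes `Body` at 0x108152 to `AtMake` at 0x108211 or to `Exit` at 0x1080f7. -/
theorem Gif.Spec.Proved.DGifGetScreenDesc_3_ok : Gif.Spec.DGifGetScreenDesc_3.Statement := by
  intro Lay hLay μ hμ u₀ hcode h_asan_store4_noabort h_asan_store1_noabort h_asan_store8_noabort H rest frames F R e ret v hat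
  exact Gif.Spec.DGifGetScreenDesc_3.sd3_seg Lay hLay μ hμ u₀ hcode h_asan_store4_noabort h_asan_store1_noabort
    h_asan_store8_noabort H rest frames F R e ret v hat
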